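-- pv_equiv track=rewrite | github.com/AJrobotics/AJMain | Dreamer/training_service.py | _detection_summary
-- ===== SOURCE A (Python) =====
-- def _detection_summary(detections):
--     """Create a human-readable summary of detections."""
--     if not detections:
--         return "No objects detected"
--     counts = {}
--     for d in detections:
--         counts[d["class"]] = counts.get(d["class"], 0) + 1
--     parts = [f"{count} {cls}" + ("s" if count > 1 else "") for cls, count in sorted(counts.items())]
--     return "Detected: " + ", ".join(parts)
-- ===== SOURCE B (Python) =====
-- def _detection_summary(detections):
--     """Create a human-readable summary of detections."""
--     if not detections:
--         return "No objects detected"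
--     classes = sorted(d["class"] for d in detections)
--     parts = []
--     i = 0
--     n = len(classes)
--     while i < n:
--         j = i + 1
--         while j < n and classes[j] == classes[i]:
--             j += 1
--         count = j - i
--         cls = classes[i]
--         parts.append(f"{count} {cls}" + ("s" if count > 1 else ""))
--         i = j
--     return "Detected: " + ", ".join(parts)
-- ===== Notes on version B (the rewrite author's own statement) =====
-- stated objective: alternative
-- what changed: Replaces the hash-map counting pass followed by sorting (class,count) pairs with sorting the class names once and scanning consecutive runs of the sorted list to emit each count.
import Mathlib
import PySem

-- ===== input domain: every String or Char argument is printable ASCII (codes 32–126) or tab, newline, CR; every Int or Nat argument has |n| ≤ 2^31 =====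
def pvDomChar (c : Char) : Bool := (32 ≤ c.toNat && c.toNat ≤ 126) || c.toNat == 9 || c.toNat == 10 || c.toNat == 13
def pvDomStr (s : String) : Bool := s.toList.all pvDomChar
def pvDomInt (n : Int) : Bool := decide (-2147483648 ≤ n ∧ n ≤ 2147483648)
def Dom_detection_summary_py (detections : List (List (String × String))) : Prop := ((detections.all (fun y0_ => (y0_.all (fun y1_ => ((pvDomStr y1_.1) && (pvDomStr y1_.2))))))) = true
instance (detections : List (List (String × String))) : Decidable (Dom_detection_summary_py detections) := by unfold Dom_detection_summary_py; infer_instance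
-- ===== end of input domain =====

-- B replaces A's dict-count-then-sort-the-items strategy by sorting the class names once
-- and scanning consecutive runs of the sorted list (alternative decomposition, same cost).

-- shared lookup helper: d["class"] on a Python dict given as an association list
-- (PySem.Dict.ofList collapses duplicate keys last-wins exactly like dict(pairs));
-- the .getD "" default is never reached on Pre_ (the key is present there).
def pvClass (d : List (String × String)) : String :=
  ((PySem.Dict.ofList d).get? "class").getD ""

-- ===== PORT A =====
def detection_summary_py (detections : List (List (String × String))) : String :=
  if detections = [] then "No objects detected"
  else
    let counts := detections.foldl
      (fun counts d => counts.insert (pvClass d) (counts.getD (pvClass d) 0 + 1))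
      (PySem.Dict.empty : PySem.Dict String Int)
    let parts := (PySem.List.sorted2 counts.items (fun p => p.1) (fun p => p.2)).map
      (fun p => PySem.Int.toStr p.2 ++ " " ++ p.1 ++ (if p.2 > 1 then "s" else ""))
    "Detected: " ++ PySem.Str.join ", " parts

-- ===== PORT B =====
-- the outer while loop of Source B: emit one part per maximal run of equal class names
def pvRuns : List String → List String
  | [] => []
  | c :: rest =>
      let count : Int := ((rest.takeWhile (fun x => x == c)).length : Int) + 1
      (PySem.Int.toStr count ++ " " ++ c ++ (if count > 1 then "s" else ""))
        :: pvRuns (rest.dropWhile (fun x => x == c))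
termination_by l => l.length
decreasing_by simpa using Nat.lt_succ_of_le (List.length_dropWhile_le _ _)

def detection_summary_py_alt (detections : List (List (String × String))) : String :=
  if detections = [] then "No objects detected"
  else
    let classes := PySem.List.sorted (detections.map (fun d => pvClass d)) (fun x => x)
    "Detected: " ++ PySem.Str.join ", " (pvRuns classes)

-- ===== PRECONDITION & SPEC =====
-- Pre_ excludes exactly the detections lacking a "class" key, on which Python A raises KeyError.
def Pre_detection_summary_py (detections : List (List (String × String))) : Prop :=
  ∀ d ∈ detections, (PySem.Dict.ofList d).contains "class" = true

instance (detections : List (List (String × String))) : Decidable (Pre_detection_summary_py detections) := by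
  unfold Pre_detection_summary_py; infer_instance

def pvWitness_detection_summary_py : (List (List (String × String))) :=
  [[("class", "cat")], [("class", "dog")], [("class", "cat")]]

def Spec_detection_summary_py (detections : List (List (String × String))) (out : String) : Prop := out = detection_summary_py_alt detections
instance (detections : List (List (String × String))) (out : String) : Decidable (Spec_detection_summary_py detections out) := by unfold Spec_detection_summary_py; infer_instance

-- ===== CLAIM (what is proved, stated in full; the proofs are below) =====
def Claim_equal_detection_summary_py : Prop := ∀ (detections : List (List (String × String))), Dom_detection_summary_py detections → Pre_detection_summary_py detections → Spec_detection_summary_py detections (detection_summary_py detections)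

-- ===== LEMMAS AND PROOFS =====

-- the common formatting of one summary part
def pvFmt (c : String) (n : Int) : String :=
  PySem.Int.toStr n ++ " " ++ c ++ (if n > 1 then "s" else "")

-- insertBy with two comparators that agree on the inserted element vs the list
lemma insertBy_congr {α : Type} (p q : α → α → Bool) (x : α) :
    ∀ (ys : List α), (∀ y ∈ ys, p x y = q x y) →
      PySem.List.insertBy p x ys = PySem.List.insertBy q x ys
  | [], _ => rfl
  | y :: ys, h => by
      simp only [PySem.List.insertBy]
      rw [h y (List.mem_cons_self)]
      split
      · rfl
      · rw [insertBy_congr p q x ys (fun z hz => h z (List.mem_cons_of_mem _ hz))]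

lemma foldl_insertBy_congr {α : Type} (p q : α → α → Bool) :
    ∀ (xs acc : List α),
      (∀ a b, (a ∈ xs ∨ a ∈ acc) → (b ∈ xs ∨ b ∈ acc) → p a b = q a b) →
      xs.foldl (fun acc x => PySem.List.insertBy p x acc) acc
        = xs.foldl (fun acc x => PySem.List.insertBy q x acc) acc
  | [], _, _ => rfl
  | x :: xs, acc, h => by
      simp only [List.foldl_cons]
      rw [insertBy_congr p q x acc (fun y hy => h x y (Or.inl List.mem_cons_self) (Or.inr hy))]
      refine foldl_insertBy_congr p q xs (PySem.List.insertBy q x acc) (fun a b ha hb => ?_)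
      have lift : ∀ z, (z ∈ xs ∨ z ∈ PySem.List.insertBy q x acc) → (z ∈ x :: xs ∨ z ∈ acc) := by
        intro z hz
        rcases hz with hz | hz
        · exact Or.inl (List.mem_cons_of_mem _ hz)
        · rcases (PySem.List.mem_insertBy q x z acc).mp hz with hz | hz
          · exact Or.inl (hz ▸ List.mem_cons_self)
          · exact Or.inr hz
      exact h a b (lift a ha) (lift b hb)

-- sorting by a tuple key equals sorting by the first key alone when firsts are distinct
lemma sorted2_eq_sorted_fst {α : Type} [LinearOrder α] (xs : List (α × Int))
    (hinj : ∀ a ∈ xs, ∀ b ∈ xs, a.1 = b.1 → a = b) :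
    PySem.List.sorted2 xs (fun p => p.1) (fun p => p.2)
      = PySem.List.sorted xs (fun p => p.1) := by
  simp only [PySem.List.sorted2, PySem.List.sorted, if_neg (by simp : ¬(false = true))]
  apply foldl_insertBy_congr
  intro a b ha hb
  rcases ha with ha | ha; swap; · simp at ha
  rcases hb with hb | hb; swap; · simp at hb
  by_cases hlt : a.1 < b.1
  · simp [hlt]
  · by_cases heq : a.1 = b.1
    · have : a = b := hinj a ha b hb heq
      subst this
      simp
    · have : b.1 < a.1 := lt_of_le_of_ne (le_of_not_gt hlt) (fun h => heq h.symm)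
      simp [hlt, this]

-- folding Set.add over elements already present keeps the set
lemma foldl_add_absorb {α : Type} [BEq α] [LawfulBEq α] :
    ∀ (t : List α) (s : PySem.Set α), (∀ y ∈ t, y ∈ s) →
      t.foldl PySem.Set.add s = s
  | [], _, _ => rfl
  | x :: t, s, h => by
      simp only [List.foldl_cons]
      rw [PySem.Set.add_of_mem (h x List.mem_cons_self)]
      exact foldl_add_absorb t s (fun y hy => h y (List.mem_cons_of_mem _ hy))

-- a head element foreign to the rest of the fold stays in front
lemma foldl_add_cons {α : Type} [BEq α] [LawfulBEq α] (c : α) :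
    ∀ (t : List α) (s : PySem.Set α), c ∉ t → c ∉ s →
      t.foldl PySem.Set.add (c :: s) = c :: t.foldl PySem.Set.add s
  | [], _, _, _ => rfl
  | x :: t, s, hct, hcs => by
      have hxc : x ≠ c := fun h => hct (h ▸ List.mem_cons_self)
      have hadd : PySem.Set.add (c :: s) x = c :: PySem.Set.add s x := by
        by_cases hx : x ∈ s
        · rw [PySem.Set.add_of_mem (List.mem_cons_of_mem _ hx), PySem.Set.add_of_mem hx]
        · rw [PySem.Set.add_of_not_mem (by simp [hx, hxc]), PySem.Set.add_of_not_mem hx]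
          rfl
      simp only [List.foldl_cons, hadd]
      refine foldl_add_cons c t (PySem.Set.add s x) (fun h => hct (List.mem_cons_of_mem _ h)) ?_
      intro h
      rcases (PySem.Set.mem_add s x c).mp h with h | h
      · exact hcs h
      · exact hxc h.symm

-- Set.ofList keeps a subsequence of its argument
lemma ofList_sublist {α : Type} [BEq α] [LawfulBEq α] :
    ∀ (xs : List α), List.Sublist (PySem.Set.ofList xs) xs
  | [] => by simp [PySem.Set.ofList_nil]
  | x :: xs => by
      rw [PySem.Set.ofList_cons]
      exact List.Sublist.cons₂ x (List.filter_sublist.trans (ofList_sublist xs))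

-- runs of a sorted list are exactly its distinct elements with their counts
lemma pvRuns_sorted : ∀ (l : List String), l.Pairwise (· ≤ ·) →
    pvRuns l = (PySem.Set.ofList l).map (fun c => pvFmt c ((l.count c : Int))) := by
  intro l
  induction l using pvRuns.induct with
  | case1 => intro _; simp [pvRuns, PySem.Set.ofList_nil]
  | case2 c rest ih =>
    intro h
    have hpr : rest.Pairwise (· ≤ ·) := (List.pairwise_cons.mp h).2
    have hcr : ∀ y ∈ rest, c ≤ y := (List.pairwise_cons.mp h).1
    have hsplit : rest.takeWhile (fun x => x == c) ++ rest.dropWhile (fun x => x == c) = rest :=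
      List.takeWhile_append_dropWhile
    have hrunc : ∀ y ∈ rest.takeWhile (fun x => x == c), y = c := by
      intro y hy
      exact eq_of_beq (List.mem_takeWhile_imp (p := fun x => x == c) hy)
    have hpr' : (rest.dropWhile (fun x => x == c)).Pairwise (· ≤ ·) :=
      hpr.sublist (List.dropWhile_sublist _)
    have hcnr : c ∉ rest.dropWhile (fun x => x == c) := by
      cases hdw : rest.dropWhile (fun x => x == c) with
      | nil => simp
      | cons x t =>
        have hne : rest.dropWhile (fun x => x == c) ≠ [] := by rw [hdw]; simp
        have hx : (x == c) = false := by
          have := List.head_dropWhile_not (fun x => x == c) hne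
          simpa [hdw] using this
        have hxc : x ≠ c := by simpa using hx
        have hxm : x ∈ rest := by
          rw [← hsplit, hdw]; simp
        have hclx : c < x := lt_of_le_of_ne (hcr x hxm) (Ne.symm hxc)
        have hpwxt : (x :: t).Pairwise (· ≤ ·) := hdw ▸ hpr'
        intro hmem
        rcases List.mem_cons.mp hmem with h1 | h1
        · exact hxc h1.symm
        · have hxy : x ≤ c := (List.pairwise_cons.mp hpwxt).1 c h1
          exact absurd (lt_of_lt_of_le hclx hxy) (lt_irrefl c)
    have hfold : rest.foldl PySem.Set.add [c]
        = c :: (rest.dropWhile (fun x => x == c)).foldl PySem.Set.add [] := by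
      conv_lhs => rw [← hsplit]
      rw [List.foldl_append,
        foldl_add_absorb _ [c] (fun y hy => by simp [hrunc y hy]),
        foldl_add_cons c _ [] hcnr (by simp)]
    have hset : PySem.Set.ofList (c :: rest)
        = c :: PySem.Set.ofList (rest.dropWhile (fun x => x == c)) := by
      rw [PySem.Set.ofList_eq_foldl]
      show ((rest).foldl PySem.Set.add (PySem.Set.add PySem.Set.empty c)) = _
      have h0 : PySem.Set.add PySem.Set.empty c = [c] := by
        rw [PySem.Set.add_of_not_mem (by simp [PySem.Set.empty])]; rfl
      rw [h0, hfold, PySem.Set.ofList_eq_foldl]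
    have hrc : rest.count c = (rest.takeWhile (fun x => x == c)).length := by
      conv_lhs => rw [← hsplit]
      rw [List.count_append,
        List.count_eq_length.mpr (fun y hy => by simp [hrunc y hy]),
        List.count_eq_zero.mpr hcnr, Nat.add_zero]
    have hcount_c : (c :: rest).count c = (rest.takeWhile (fun x => x == c)).length + 1 := by
      rw [List.count_cons_self, hrc]
    have hcount_d : ∀ d ∈ rest.dropWhile (fun x => x == c),
        (c :: rest).count d = (rest.dropWhile (fun x => x == c)).count d := by
      intro d hd
      have hdc : d ≠ c := fun hh => hcnr (hh ▸ hd)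
      have hdrun : (rest.takeWhile (fun x => x == c)).count d = 0 :=
        List.count_eq_zero.mpr (fun hdm => hdc (hrunc d hdm))
      rw [List.count_cons_of_ne (Ne.symm hdc)]
      conv_lhs => rw [← hsplit]
      rw [List.count_append, hdrun, Nat.zero_add]
    simp only [pvRuns]
    rw [hset, List.map_cons, ih hpr']
    congr 1
    · simp only [pvFmt, hcount_c]
      push_cast
      rfl
    · refine List.map_congr_left (fun d hd => ?_)
      rw [hcount_d d ((PySem.Set.mem_ofList _ d).mp hd)]

-- ===== VERDICT (by name: the statement is the Claim_ definition above) =====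
theorem detection_summary_py_spec : Claim_equal_detection_summary_py := by
  intro det _ _
  show detection_summary_py det = detection_summary_py_alt det
  by_cases hdet : det = []
  · subst hdet; rfl
  · simp only [detection_summary_py, detection_summary_py_alt, if_neg hdet]
    congr 1
    -- the distinct class multiset both sides summarise
    have hfold : det.foldl
        (fun counts d => counts.insert (pvClass d) (counts.getD (pvClass d) 0 + 1))
        (PySem.Dict.empty : PySem.Dict String Int)
        = PySem.Dict.counter (det.map (fun d => pvClass d)) := by
      calc det.foldl (fun counts d => counts.insert (pvClass d) (counts.getD (pvClass d) 0 + 1))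
            (PySem.Dict.empty : PySem.Dict String Int)
          = (det.map (fun d => pvClass d)).foldl
              (fun counts x => counts.insert x (counts.getD x 0 + 1)) PySem.Dict.empty := by
            rw [List.foldl_map]
        _ = PySem.Dict.counter (det.map (fun d => pvClass d)) :=
            PySem.Dict.foldl_insert_getD_add_one_eq_counter _
    -- A's sorted (class, count) pairs, via the counter characterisation
    have hinj : ∀ a ∈ (PySem.Set.ofList (det.map (fun d => pvClass d))).map
          (fun k => (k, ((det.map (fun d => pvClass d)).count k : Int))),
        ∀ b ∈ (PySem.Set.ofList (det.map (fun d => pvClass d))).map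
          (fun k => (k, ((det.map (fun d => pvClass d)).count k : Int))),
        a.1 = b.1 → a = b := by
      intro a ha b hb hab
      rcases List.mem_map.mp ha with ⟨k1, _, rfl⟩
      rcases List.mem_map.mp hb with ⟨k2, _, rfl⟩
      simp only at hab
      rw [hab]
    have hsorted2 : PySem.List.sorted2
          ((PySem.Set.ofList (det.map (fun d => pvClass d))).map
            (fun k => (k, ((det.map (fun d => pvClass d)).count k : Int))))
          (fun p => p.1) (fun p => p.2)
        = (PySem.List.sorted (PySem.Set.ofList (det.map (fun d => pvClass d))) (fun x => x)).map
            (fun k => (k, ((det.map (fun d => pvClass d)).count k : Int))) := by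
      rw [sorted2_eq_sorted_fst _ hinj]
      refine PySem.List.sorted_eq_of_perm_of_pairwise_lt _ _ _
        ((PySem.List.sorted_perm _ _ _).map _) ?_
      exact List.pairwise_map.mpr
        (by simpa using PySem.List.sorted_ofList_pairwise_lt (det.map (fun d => pvClass d)))
    -- B's runs over the sorted class list
    have hpwS : (PySem.List.sorted (det.map (fun d => pvClass d)) (fun x => x)).Pairwise (· ≤ ·) := by
      simpa using PySem.List.sorted_pairwise (det.map (fun d => pvClass d)) (fun x => x)
    have hpermS : (PySem.List.sorted (det.map (fun d => pvClass d)) (fun x => x)).Perm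
        (det.map (fun d => pvClass d)) := PySem.List.sorted_perm _ _ _
    have hofs : PySem.Set.ofList (PySem.List.sorted (det.map (fun d => pvClass d)) (fun x => x))
        = PySem.List.sorted (PySem.Set.ofList (det.map (fun d => pvClass d))) (fun x => x) := by
      symm
      refine PySem.List.sorted_eq_of_perm_of_pairwise_lt _ _ _ ?_ ?_
      · exact (List.perm_ext_iff_of_nodup (PySem.Set.nodup_ofList _)
          (PySem.Set.nodup_ofList _)).mpr
          (fun a => by simp [PySem.Set.mem_ofList, hpermS.mem_iff])
      · have h1 : (PySem.Set.ofList (PySem.List.sorted (det.map (fun d => pvClass d))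
            (fun x => x))).Pairwise (· ≤ ·) := hpwS.sublist (ofList_sublist _)
        exact (h1.and (PySem.Set.nodup_ofList _)).imp (fun h => lt_of_le_of_ne h.1 h.2)
    rw [hfold, PySem.Dict.items_counter, hsorted2, List.map_map,
      pvRuns_sorted _ hpwS, hofs]
    refine congrArg _ (List.map_congr_left (fun c _ => ?_))
    simp only [Function.comp, pvFmt, hpermS.count_eq]
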